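-- pv_equiv track=rewrite | github.com/spyysalo/prodigy-relation-annotation | conll_to_examples.py | conll_to_mentions
-- ===== SOURCE A (Python) =====
-- from collections import namedtuple
--
-- Mention = namedtuple('Mention', 'start end type text')
--
-- def conll_to_mentions(words, tags):
--     mentions, offset, start, label = [], 0, None, None
--     sentence = ' '.join(words)
--     for word, tag in zip(words, tags):
--         if tag[0] in 'OB' and start is not None:    # current ends
--             end = offset-1
--             mentions.append(Mention(start, end, label, sentence[start:end]))
--             start, label = None, None
--         if tag[0] == 'B':
--             start, label = offset, tag[2:]
--         elif tag[0] == 'I':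
--             if start is None:    # I without B, but nevermind
--                 start, label = offset, tag[2:]
--         else:
--             assert tag == 'O', 'unexpected tag {}'.format(tag)
--         offset += len(word) + 1    # +1 for space
--     if start is not None:    # span open at sentence end
--         end = offset-1
--         mentions.append(Mention(start, end, label, sentence[start:end]))
--     return mentions
-- ===== SOURCE B (Python) =====
-- from collections import namedtuple
--
-- Mention = namedtuple('Mention', 'start end type text')
--
-- def conll_to_mentions(words, tags):
--     sentence = ' '.join(words)
--     pairs = list(zip(words, tags))
--     # Phase 1: character offset of each token start (plus one past the end)
--     offsets, off = [], 0
--     for w, _ in pairs: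
--         offsets.append(off)
--         off += len(w) + 1
--     offsets.append(off)
--     # Phase 2: token-level spans (start_tok, end_tok_exclusive, label)
--     spans, open_ = [], None
--     for i, (_, tag) in enumerate(pairs):
--         c = tag[0]
--         if c == 'B':
--             if open_ is not None:
--                 spans.append((open_[0], i, open_[1]))
--             open_ = (i, tag[2:])
--         elif c == 'I':
--             if open_ is None:    # stray I opens a span, as in the original
--                 open_ = (i, tag[2:])
--         else:
--             assert tag == 'O', 'unexpected tag {}'.format(tag)
--             if open_ is not None:
--                 spans.append((open_[0], i, open_[1]))
--                 open_ = None
--     if open_ is not None: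
--         spans.append((open_[0], len(pairs), open_[1]))
--     # Phase 3: resolve token spans to character mentions
--     return [Mention(offsets[s], offsets[e] - 1, l, sentence[offsets[s]:offsets[e] - 1])
--             for s, e, l in spans]
-- ===== Notes on version B (the rewrite author's own statement) =====
-- stated objective: alternative
-- what changed: A's single loop that interleaves offset arithmetic, span state and mention construction is re-decomposed into three phases: a prefix table of token start offsets, a scan collecting token-index spans, and a resolution pass turning each token span into a character mention.
import Mathlib
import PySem

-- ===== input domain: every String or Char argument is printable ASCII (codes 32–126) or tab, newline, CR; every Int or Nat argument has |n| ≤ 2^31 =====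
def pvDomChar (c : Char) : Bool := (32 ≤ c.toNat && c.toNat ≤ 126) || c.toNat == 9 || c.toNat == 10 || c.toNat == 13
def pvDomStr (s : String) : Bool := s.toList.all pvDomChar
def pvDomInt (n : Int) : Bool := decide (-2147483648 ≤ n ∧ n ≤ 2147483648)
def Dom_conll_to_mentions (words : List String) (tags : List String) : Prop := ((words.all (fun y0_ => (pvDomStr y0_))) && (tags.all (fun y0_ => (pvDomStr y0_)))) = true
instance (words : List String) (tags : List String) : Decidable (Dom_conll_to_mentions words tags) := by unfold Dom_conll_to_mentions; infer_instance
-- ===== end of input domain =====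

-- B re-decomposes A's single interleaved loop into three phases (offset table, token-level
-- spans, span resolution); objective: alternative decomposition, same asymptotic cost.
-- ===== PORT A =====
-- a mention record: (start, end, label, sentence[start:end])
def pvMention (sent : String) (start stop : Int) (label : String) : Int × Int × String × String :=
  (start, stop, label, PySem.Str.slice sent (some start) (some stop))

-- the loop of A over zip(words, tags); state = (mentions, offset, start/label as an Option)
def pvLoopA (sent : String) : List (String × String) → List (Int × Int × String × String) → Int → Option (Int × String) → List (Int × Int × String × String)
  | [], ms, off, op =>
      match op with                                   -- span open at sentence end
      | none => ms
      | some (s, l) => ms ++ [pvMention sent s (off - 1) l]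
  | (w, t) :: rest, ms, off, op =>
      match PySem.Str.pyGet? t 0 with
      | none => ms                                    -- tag[0] IndexError: outside Pre_
      | some c =>
        -- tag[0] in 'OB' and start is not None: current mention ends
        let st := if (c = 'O' ∨ c = 'B') ∧ op.isSome then
            (match op with
             | some (s, l) => (ms ++ [pvMention sent s (off - 1) l], (none : Option (Int × String)))
             | none => (ms, op))
          else (ms, op)
        if c = 'B' then
          pvLoopA sent rest st.1 (off + PySem.Str.len w + 1) (some (off, PySem.Str.slice t (some 2) none))
        else if c = 'I' then
          match st.2 with
          | none => pvLoopA sent rest st.1 (off + PySem.Str.len w + 1) (some (off, PySem.Str.slice t (some 2) none))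
          | some p => pvLoopA sent rest st.1 (off + PySem.Str.len w + 1) (some p)
        else if t = "O" then
          pvLoopA sent rest st.1 (off + PySem.Str.len w + 1) none
        else st.1                                     -- AssertionError: outside Pre_

def conll_to_mentions (words : List String) (tags : List String) : List (Int × Int × String × String) :=
  pvLoopA (PySem.Str.join " " words) (words.zip tags) [] 0 none

-- ===== PORT B =====
-- Phase 1: character offset of each token start, plus one past the end
def pvOffsets : List (String × String) → Int → List Int
  | [], off => [off]
  | (w, _) :: rest, off => off :: pvOffsets rest (off + PySem.Str.len w + 1)

-- Phase 2: token-level spans (start_tok, end_tok_exclusive, label); i = current index, sp = spans so far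
def pvSpans : List (String × String) → Int → Option (Int × String) → List (Int × Int × String) → List (Int × Int × String)
  | [], n, op, sp =>
      match op with
      | none => sp
      | some (s, l) => sp ++ [(s, n, l)]
  | (_, t) :: rest, i, op, sp =>
      match PySem.Str.pyGet? t 0 with
      | none => sp                                    -- tag[0] IndexError: outside Pre_
      | some c =>
        if c = 'B' then
          pvSpans rest (i + 1) (some (i, PySem.Str.slice t (some 2) none))
            (match op with | some (s, l) => sp ++ [(s, i, l)] | none => sp)
        else if c = 'I' then
          match op with
          | none => pvSpans rest (i + 1) (some (i, PySem.Str.slice t (some 2) none)) sp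
          | some p => pvSpans rest (i + 1) (some p) sp
        else if t = "O" then
          pvSpans rest (i + 1) none
            (match op with | some (s, l) => sp ++ [(s, i, l)] | none => sp)
        else sp                                       -- AssertionError: outside Pre_

-- Phase 3: resolve one token span to a character mention
def pvResolve (sent : String) (offs : List Int) (sp : Int × Int × String) : Int × Int × String × String :=
  let s := PySem.List.pyGetD offs sp.1 0
  let e := PySem.List.pyGetD offs sp.2.1 0 - 1
  (s, e, sp.2.2, PySem.Str.slice sent (some s) (some e))

def conll_to_mentions_alt (words : List String) (tags : List String) : List (Int × Int × String × String) :=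
  let sent := PySem.Str.join " " words
  let pairs := words.zip tags
  let offs := pvOffsets pairs 0
  (pvSpans pairs 0 none []).map (pvResolve sent offs)

-- ===== PRECONDITION & SPEC =====
-- Pre_ excludes exactly the inputs on which A raises: a zipped tag that is empty or whose
-- first character is not 'B'/'I' (IndexError / AssertionError, incl. tags like 'Ox').
def Pre_conll_to_mentions (words : List String) (tags : List String) : Prop :=
  ∀ p ∈ words.zip tags,
    PySem.Str.pyGet? p.2 0 = some 'B' ∨ PySem.Str.pyGet? p.2 0 = some 'I' ∨ p.2 = "O"
instance (words : List String) (tags : List String) : Decidable (Pre_conll_to_mentions words tags) := by unfold Pre_conll_to_mentions; infer_instance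

def pvWitness_conll_to_mentions : List String × List String :=
  (["Barack", "Obama", "visited", "Paris", "today"], ["B-PER", "I-PER", "O", "B-LOC", "O"])

def Spec_conll_to_mentions (words : List String) (tags : List String) (out : List (Int × Int × String × String)) : Prop := out = conll_to_mentions_alt words tags
instance (words : List String) (tags : List String) (out : List (Int × Int × String × String)) : Decidable (Spec_conll_to_mentions words tags out) := by unfold Spec_conll_to_mentions; infer_instance

-- ===== CLAIM (what is proved, stated in full; the proofs are below) =====
def Claim_equal_conll_to_mentions : Prop := ∀ (words : List String) (tags : List String), Dom_conll_to_mentions words tags → Pre_conll_to_mentions words tags → Spec_conll_to_mentions words tags (conll_to_mentions words tags)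

-- ===== LEMMAS AND PROOFS =====
-- total character length of a list of (word, tag) pairs, counting the separating spaces
def pvCum (l : List (String × String)) : Int := (l.map (fun p => PySem.Str.len p.1 + 1)).sum

theorem pvCum_cons (p : String × String) (l : List (String × String)) :
    pvCum (p :: l) = PySem.Str.len p.1 + 1 + pvCum l := by
  simp [pvCum]

-- the spans accumulator only ever grows at the back
theorem pvSpans_acc (rest : List (String × String)) :
    ∀ (i : Int) (op : Option (Int × String)) (sp : List (Int × Int × String)),
      pvSpans rest i op sp = sp ++ pvSpans rest i op [] := by
  induction rest with
  | nil =>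
      intro i op sp
      cases op with
      | none => simp [pvSpans]
      | some q => obtain ⟨s, l⟩ := q; simp [pvSpans]
  | cons head rest ih =>
      obtain ⟨w, t⟩ := head
      intro i op sp
      cases hc : PySem.List.pyGet? t.toList 0 with
      | none => simp [pvSpans, hc]
      | some c =>
        by_cases hB : c = 'B'
        · subst hB
          cases op with
          | none =>
              simp [pvSpans, hc]
              exact ih _ _ _
          | some q =>
              obtain ⟨s, l⟩ := q
              simp [pvSpans, hc]
              rw [ih _ _ (sp ++ [(s, i, l)]), ih _ _ [(s, i, l)]]
              simp
        · by_cases hI : c = 'I'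
          · subst hI
            cases op with
            | none =>
                simp [pvSpans, hc]
                exact ih _ _ _
            | some q =>
                obtain ⟨s, l⟩ := q
                simp [pvSpans, hc]
                exact ih _ _ _
          · by_cases hO : t = "O"
            · cases op with
              | none =>
                  simp [pvSpans, hO]
                  exact ih _ _ _
              | some q =>
                  obtain ⟨s, l⟩ := q
                  simp [pvSpans, hO]
                  rw [ih _ _ (sp ++ [(s, i, l)]), ih _ _ [(s, i, l)]]
                  simp
            · simp [pvSpans, hc, hB, hI, hO]

-- indexing the offset table: entry k is the running offset plus the lengths before it
theorem pvOffsets_get (l : List (String × String)) :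
    ∀ (off : Int) (k : Nat), k ≤ l.length →
      PySem.List.pyGetD (pvOffsets l off) (k : Int) 0 = off + pvCum (l.take k) := by
  induction l with
  | nil =>
      intro off k hk
      have hk0 : k = 0 := by simpa using hk
      subst hk0
      simp [pvOffsets, pvCum]
  | cons head rest ih =>
      obtain ⟨w, t⟩ := head
      intro off k hk
      cases k with
      | zero => simp [pvOffsets, pvCum]
      | succ k =>
        have hk' : k ≤ rest.length := by simpa using hk
        have hrec := ih (off + PySem.Str.len w + 1) k hk'
        simp only [PySem.List.pyGetD_natCast] at hrec ⊢
        simp only [pvOffsets, List.take_succ_cons, pvCum_cons, List.getD_cons_succ]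
        rw [hrec]; ring

-- the main loop invariant: A's loop equals the resolved spans of B's collector,
-- provided the offset table agrees with A's running offset on the remaining tokens
theorem pvMain (sent : String) (offs : List Int) (rest : List (String × String)) :
    ∀ (i off : Int) (op : Option (Int × String)) (ms : List (Int × Int × String × String)),
      (∀ p ∈ rest, PySem.Str.pyGet? p.2 0 = some 'B' ∨ PySem.Str.pyGet? p.2 0 = some 'I' ∨ p.2 = "O") →
      (∀ k : Nat, k ≤ rest.length → PySem.List.pyGetD offs (i + (k : Int)) 0 = off + pvCum (rest.take k)) →
      pvLoopA sent rest ms off (op.map (fun q => (PySem.List.pyGetD offs q.1 0, q.2)))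
        = ms ++ (pvSpans rest i op []).map (pvResolve sent offs) := by
  induction rest with
  | nil =>
      intro i off op ms _ hoffs
      have h0 : PySem.List.pyGetD offs i 0 = off := by
        simpa [pvCum] using hoffs 0 (by simp)
      cases op with
      | none => simp [pvLoopA, pvSpans]
      | some q =>
        obtain ⟨s, l⟩ := q
        simp [pvLoopA, pvSpans, pvResolve, pvMention, h0]
  | cons head rest ih =>
      obtain ⟨w, t⟩ := head
      intro i off op ms hgood hoffs
      have h0 : PySem.List.pyGetD offs i 0 = off := by
        simpa [pvCum] using hoffs 0 (by simp)
      have hoffs' : ∀ k : Nat, k ≤ rest.length →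
          PySem.List.pyGetD offs ((i + 1) + (k : Int)) 0 = (off + PySem.Str.len w + 1) + pvCum (rest.take k) := by
        intro k hk
        have hx := hoffs (k + 1) (by simpa using hk)
        have harg : i + ((k + 1 : Nat) : Int) = (i + 1) + (k : Int) := by push_cast; ring
        rw [harg] at hx
        rw [hx, List.take_succ_cons, pvCum_cons]
        ring
      have hgood' : ∀ p ∈ rest, PySem.Str.pyGet? p.2 0 = some 'B' ∨ PySem.Str.pyGet? p.2 0 = some 'I' ∨ p.2 = "O" :=
        fun p hp => hgood p (List.mem_cons_of_mem _ hp)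
      rcases hgood (w, t) List.mem_cons_self with hB | hI | hO
      · -- tag starts with 'B'
        have hc : PySem.List.pyGet? t.toList 0 = some 'B' := by simpa using hB
        cases op with
        | none =>
            simp [pvLoopA, pvSpans, hc]
            simpa [h0] using ih (i + 1) (off + PySem.Str.len w + 1)
              (some (i, PySem.Str.slice t (some 2) none)) ms hgood' hoffs'
        | some q =>
            obtain ⟨s, l⟩ := q
            simp [pvLoopA, pvSpans, hc]
            rw [pvSpans_acc rest (i + 1) (some (i, PySem.Str.slice t (some 2) none)) [(s, i, l)]]
            have ihx := ih (i + 1) (off + PySem.Str.len w + 1)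
              (some (i, PySem.Str.slice t (some 2) none))
              (ms ++ [pvMention sent (PySem.List.pyGetD offs s 0) (off - 1) l]) hgood' hoffs'
            simpa [h0, pvResolve, pvMention, List.append_assoc] using ihx
      · -- tag starts with 'I'
        have hc : PySem.List.pyGet? t.toList 0 = some 'I' := by simpa using hI
        cases op with
        | none =>
            simp [pvLoopA, pvSpans, hc]
            simpa [h0] using ih (i + 1) (off + PySem.Str.len w + 1)
              (some (i, PySem.Str.slice t (some 2) none)) ms hgood' hoffs'
        | some q =>
            obtain ⟨s, l⟩ := q
            simp [pvLoopA, pvSpans, hc]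
            simpa using ih (i + 1) (off + PySem.Str.len w + 1) (some (s, l)) ms hgood' hoffs'
      · -- tag is exactly "O"
        have hO' : t = "O" := hO
        subst hO'
        cases op with
        | none =>
            simp [pvLoopA, pvSpans]
            simpa using ih (i + 1) (off + PySem.Str.len w + 1) none ms hgood' hoffs'
        | some q =>
            obtain ⟨s, l⟩ := q
            simp [pvLoopA, pvSpans]
            rw [pvSpans_acc rest (i + 1) none [(s, i, l)]]
            have ihx := ih (i + 1) (off + PySem.Str.len w + 1) none
              (ms ++ [pvMention sent (PySem.List.pyGetD offs s 0) (off - 1) l]) hgood' hoffs'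
            simpa [h0, pvResolve, pvMention, List.append_assoc] using ihx

-- ===== VERDICT (by name: the statement is the Claim_ definition above) =====
theorem conll_to_mentions_spec : Claim_equal_conll_to_mentions := by
  intro words tags _ hpre
  unfold Spec_conll_to_mentions conll_to_mentions conll_to_mentions_alt
  have hmain := pvMain (PySem.Str.join " " words) (pvOffsets (words.zip tags) 0) (words.zip tags)
    0 0 none [] hpre
    (by
      intro k hk
      simpa using pvOffsets_get (words.zip tags) 0 k hk)
  simpa using hmain
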